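-- pv_equiv track=rewrite | github.com/nikoladze/aoc2021 | day19/solver.py | transform_and_shift_list
-- ===== SOURCE A (Python) =====
-- def rotate(x, y, z, axis):
--     return [
--         (x, z, -y),
--         (z, y, -x),
--         (y, -x, z),
--     ][axis]
--
-- def rotate_n(x, y, z, axis, n):
--     for i in range(n):
--         x, y, z = rotate(x, y, z, axis)
--     return x, y, z
--
-- POINTING_PERMUTATIONS = [
--     lambda x, y, z: (x, y, z),
--     lambda x, y, z: (x, z, -y),
--     lambda x, y, z: (x, -y, -z),
--     lambda x, y, z: (x, -z, y),
--     lambda x, y, z: (-z, y, x),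
--     lambda x, y, z: (z, y, -x)
-- ]
--
-- def transform(x, y, z, i_permutation, n_rotations):
--     permute = POINTING_PERMUTATIONS[i_permutation]
--     return rotate_n(*permute(x, y, z), axis=2, n=n_rotations)
--
-- def transform_and_shift_list(coord_list, i_permutation, n_rotations, shift):
--     out = []
--     for coords in coord_list:
--         x, y, z = transform(*coords, i_permutation, n_rotations)
--         dx, dy, dz = shift
--         x, y, z = (x - dx, y - dy, z - dz)
--         out.append((x, y, z))
--     return out
-- ===== SOURCE B (Python) =====
-- # Precompute the net signed permutation once (permutation composed with
-- # n_rotations quarter-turns about axis 2, reduced mod 4), then apply it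
-- # to each point in a single flat pass.
--
-- _PERM_TABLES = [
--     ((0, 1), (1, 1), (2, 1)),    # (x, y, z)
--     ((0, 1), (2, 1), (1, -1)),   # (x, z, -y)
--     ((0, 1), (1, -1), (2, -1)),  # (x, -y, -z)
--     ((0, 1), (2, -1), (1, 1)),   # (x, -z, y)
--     ((2, -1), (1, 1), (0, 1)),   # (-z, y, x)
--     ((2, 1), (1, 1), (0, -1)),   # (z, y, -x)
-- ]
--
-- def transform_and_shift_list(coord_list, i_permutation, n_rotations, shift):
--     t = _PERM_TABLES[i_permutation]
--     r = n_rotations % 4 if n_rotations > 0 else 0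
--     for _ in range(r):
--         a, b, c = t
--         t = (b, (a[0], -a[1]), c)  # quarter-turn about axis 2: (x,y,z) -> (y,-x,z)
--     (i0, s0), (i1, s1), (i2, s2) = t
--     dx, dy, dz = shift
--     return [(s0 * p[i0] - dx, s1 * p[i1] - dy, s2 * p[i2] - dz)
--             for p in coord_list]
-- ===== Notes on version B (the rewrite author's own statement) =====
-- stated objective: faster
-- what changed: B composes the pointing permutation with the quarter-turn rotation symbolically once (reducing n_rotations mod 4) into a signed index table, then applies that table to every point in one flat pass, instead of A's per-point inner loop of n_rotations rotate calls.
-- outside the precondition, e.g. on transform_and_shift_list([], 6, 0, (0, 0, 0)): A returns [], B raises IndexError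
import Mathlib
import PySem

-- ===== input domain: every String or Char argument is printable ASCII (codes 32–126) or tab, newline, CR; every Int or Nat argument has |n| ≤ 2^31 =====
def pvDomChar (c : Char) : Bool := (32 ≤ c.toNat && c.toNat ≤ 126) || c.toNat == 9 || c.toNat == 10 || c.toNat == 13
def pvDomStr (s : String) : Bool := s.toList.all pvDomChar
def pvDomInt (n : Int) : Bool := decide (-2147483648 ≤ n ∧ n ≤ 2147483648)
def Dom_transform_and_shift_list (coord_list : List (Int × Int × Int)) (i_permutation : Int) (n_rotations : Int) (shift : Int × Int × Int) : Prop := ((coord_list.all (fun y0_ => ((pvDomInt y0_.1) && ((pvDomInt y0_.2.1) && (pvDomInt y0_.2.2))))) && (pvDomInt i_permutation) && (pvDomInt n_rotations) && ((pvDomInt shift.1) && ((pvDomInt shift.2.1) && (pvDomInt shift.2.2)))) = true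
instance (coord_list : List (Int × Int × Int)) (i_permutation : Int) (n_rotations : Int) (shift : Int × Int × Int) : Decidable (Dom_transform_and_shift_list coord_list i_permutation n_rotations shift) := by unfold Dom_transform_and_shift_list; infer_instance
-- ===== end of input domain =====

-- B precomputes the net signed permutation (permutation ∘ rotation^n, n reduced mod 4)
-- once and applies it in one flat pass; objective: faster (removes the per-point rotation loop).

-- ===== PORT A =====
-- rotate(x, y, z, axis): list of three candidate triples indexed by axis (axis is always 2
-- at the call sites; the .getD fallback only totalises the out-of-range case Python never reaches here)
def rotateA (x y z : Int) (axis : Int) : Option (Int × Int × Int) :=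
  PySem.List.pyGet? [(x, z, -y), (z, y, -x), (y, -x, z)] axis

-- rotate_n: for i in range(n): x,y,z = rotate(x,y,z,axis)
def rotate_nA (x y z : Int) (axis : Int) (n : Int) : Int × Int × Int :=
  (PySem.List.pyRange 0 n 1).foldl (fun p _ => (rotateA p.1 p.2.1 p.2.2 axis).getD p) (x, y, z)

def pointingPermutations : List (Int → Int → Int → Int × Int × Int) :=
  [ fun x y z => (x, y, z),
    fun x y z => (x, z, -y),
    fun x y z => (x, -y, -z),
    fun x y z => (x, -z, y),
    fun x y z => (-z, y, x),
    fun x y z => (z, y, -x) ]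

-- transform: POINTING_PERMUTATIONS[i_permutation] (none = IndexError, excluded by Pre_)
def transformA (x y z : Int) (i_permutation n_rotations : Int) : Int × Int × Int :=
  match PySem.List.pyGet? pointingPermutations i_permutation with
  | some permute =>
      let q := permute x y z
      rotate_nA q.1 q.2.1 q.2.2 2 n_rotations
  | none => (x, y, z)   -- unreachable under Pre_ (Python raises IndexError)

def transform_and_shift_list (coord_list : List (Int × Int × Int)) (i_permutation : Int) (n_rotations : Int) (shift : Int × Int × Int) : List (Int × Int × Int) :=
  coord_list.foldl (fun out coords =>
    let t := transformA coords.1 coords.2.1 coords.2.2 i_permutation n_rotations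
    out ++ [(t.1 - shift.1, t.2.1 - shift.2.1, t.2.2 - shift.2.2)]) []

-- ===== PORT B =====
def permTables : List (List (Int × Int)) :=
  [ [(0, 1), (1, 1), (2, 1)],
    [(0, 1), (2, 1), (1, -1)],
    [(0, 1), (1, -1), (2, -1)],
    [(0, 1), (2, -1), (1, 1)],
    [(2, -1), (1, 1), (0, 1)],
    [(2, 1), (1, 1), (0, -1)] ]

-- one quarter-turn about axis 2 applied to the symbolic table
def rotTable (t : List (Int × Int)) : List (Int × Int) :=
  match t with
  | [a, b, c] => [b, (a.1, -a.2), c]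
  | _ => t

def selCoord (p : Int × Int × Int) (i : Int) : Int :=
  if i = 0 then p.1 else if i = 1 then p.2.1 else p.2.2

def transform_and_shift_list_alt (coord_list : List (Int × Int × Int)) (i_permutation : Int) (n_rotations : Int) (shift : Int × Int × Int) : List (Int × Int × Int) :=
  let t0 := (PySem.List.pyGet? permTables i_permutation).getD []   -- fallback unreachable under Pre_
  let r : Int := if n_rotations > 0 then PySem.Int.mod n_rotations 4 else 0
  let t := (PySem.List.pyRange 0 r 1).foldl (fun acc _ => rotTable acc) t0
  match t with
  | [e0, e1, e2] =>
      coord_list.map (fun p =>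
        (e0.2 * selCoord p e0.1 - shift.1,
         e1.2 * selCoord p e1.1 - shift.2.1,
         e2.2 * selCoord p e2.1 - shift.2.2))
  | _ => []

-- ===== PRECONDITION & SPEC =====
-- Pre_ excludes i_permutation values outside -6..5: there Python's
-- POINTING_PERMUTATIONS[i_permutation] raises IndexError in both programs whenever a point
-- is processed; on an empty coord_list A happens never to evaluate the index and returns [],
-- while B, which validates the permutation once up front, raises — a defensible corner.
def Pre_transform_and_shift_list (coord_list : List (Int × Int × Int)) (i_permutation : Int) (n_rotations : Int) (shift : Int × Int × Int) : Prop :=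
  -6 ≤ i_permutation ∧ i_permutation < 6
instance (coord_list : List (Int × Int × Int)) (i_permutation : Int) (n_rotations : Int) (shift : Int × Int × Int) : Decidable (Pre_transform_and_shift_list coord_list i_permutation n_rotations shift) := by unfold Pre_transform_and_shift_list; infer_instance

def pvWitness_transform_and_shift_list : (List (Int × Int × Int)) × Int × Int × (Int × Int × Int) :=
  ([(1, 2, 3), (-4, 0, 5)], 4, 3, (1, -1, 2))

def Spec_transform_and_shift_list (coord_list : List (Int × Int × Int)) (i_permutation : Int) (n_rotations : Int) (shift : Int × Int × Int) (out : List (Int × Int × Int)) : Prop := out = transform_and_shift_list_alt coord_list i_permutation n_rotations shift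
instance (coord_list : List (Int × Int × Int)) (i_permutation : Int) (n_rotations : Int) (shift : Int × Int × Int) (out : List (Int × Int × Int)) : Decidable (Spec_transform_and_shift_list coord_list i_permutation n_rotations shift out) := by unfold Spec_transform_and_shift_list; infer_instance

-- ===== CLAIM (what is proved, stated in full; the proofs are below) =====
def Claim_equal_transform_and_shift_list : Prop := ∀ (coord_list : List (Int × Int × Int)) (i_permutation : Int) (n_rotations : Int) (shift : Int × Int × Int), Dom_transform_and_shift_list coord_list i_permutation n_rotations shift → Pre_transform_and_shift_list coord_list i_permutation n_rotations shift → Spec_transform_and_shift_list coord_list i_permutation n_rotations shift (transform_and_shift_list coord_list i_permutation n_rotations shift)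

-- ===== LEMMAS AND PROOFS =====

-- one quarter-turn about axis 2 on an actual point
def rotStepP (p : Int × Int × Int) : Int × Int × Int := (p.2.1, -p.1, p.2.2)

-- a foldl that ignores the list elements is function iteration
theorem foldl_const_iterate {α β : Type} (g : α → α) (l : List β) (a : α) :
    l.foldl (fun p _ => g p) a = g^[l.length] a := by
  induction l generalizing a with
  | nil => rfl
  | cons x xs ih => simp [List.foldl_cons, ih, Function.iterate_succ_apply]

theorem rotate_nA_eq (x y z n : Int) :
    rotate_nA x y z 2 n = rotStepP^[n.toNat] (x, y, z) := by
  unfold rotate_nA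
  have h : (fun (p : Int × Int × Int) (_ : Int) => (rotateA p.1 p.2.1 p.2.2 2).getD p)
      = fun p _ => rotStepP p := by
    funext p i
    simp [rotateA, rotStepP, PySem.List.pyGet?, PySem.List.pyIdx?]
  rw [h, foldl_const_iterate, PySem.List.length_pyRange_one]
  norm_num

theorem rotStepP_four (p : Int × Int × Int) : rotStepP^[4] p = p := by
  simp [rotStepP, Function.iterate_succ_apply]

theorem rotStepP_mod (m : Nat) (p : Int × Int × Int) :
    rotStepP^[m] p = rotStepP^[m % 4] p := by
  induction m using Nat.strong_induction_on with
  | _ m ih =>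
    by_cases h : m < 4
    · rw [Nat.mod_eq_of_lt h]
    · have hm : m = (m - 4) + 4 := by omega
      have h4 : (m - 4) % 4 = m % 4 := by omega
      conv_lhs => rw [hm, Function.iterate_add_apply, rotStepP_four, ih (m - 4) (by omega), h4]

-- iterate the previous fact: the table tracks rotStepP, component by component
theorem table_iter (m : Nat) (a b c : Int × Int) (p : Int × Int × Int) :
    ∃ a' b' c', rotTable^[m] [a, b, c] = [a', b', c'] ∧
      (a'.2 * selCoord p a'.1, b'.2 * selCoord p b'.1, c'.2 * selCoord p c'.1)
        = rotStepP^[m] (a.2 * selCoord p a.1, b.2 * selCoord p b.1, c.2 * selCoord p c.1) := by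
  induction m generalizing a b c with
  | zero => exact ⟨a, b, c, rfl, rfl⟩
  | succ k ih =>
    obtain ⟨a', b', c', h1, h2⟩ := ih b (a.1, -a.2) c
    refine ⟨a', b', c', ?_, ?_⟩
    · rw [Function.iterate_succ_apply]; simpa [rotTable] using h1
    · rw [Function.iterate_succ_apply, h2]
      simp [rotStepP]

theorem r_toNat (n : Int) :
    (if n > 0 then PySem.Int.mod n 4 else 0).toNat = n.toNat % 4 := by
  split_ifs with h
  · have := PySem.Int.mod_eq_emod_of_pos (a := n) (b := 4) (by norm_num)
    rw [this]
    omega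
  · omega

-- ===== VERDICT (by name: the statement is the Claim_ definition above) =====
theorem transform_and_shift_list_spec : Claim_equal_transform_and_shift_list := by
  intro coord_list ip nr shift _ hpre
  obtain ⟨h1, h2⟩ := hpre
  unfold Spec_transform_and_shift_list transform_and_shift_list transform_and_shift_list_alt
  rw [PySem.List.foldl_append_singleton_eq_map]
  simp only [List.nil_append]
  -- reduce B's rotation fold to table iteration
  rw [foldl_const_iterate, PySem.List.length_pyRange_one]
  simp only [Int.sub_zero, r_toNat]
  -- case over the 12 admissible permutation indices
  interval_cases ip <;>
  · simp [transformA, permTables, pointingPermutations, PySem.List.pyGet?, PySem.List.pyIdx?]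
    obtain ⟨a', b', c', hsh, -⟩ := table_iter (nr.toNat % 4) _ _ _ ((0 : Int), (0 : Int), (0 : Int))
    rw [hsh]
    apply List.map_congr_left
    intro p _
    obtain ⟨a2, b2, c2, hsh2, happ2⟩ := table_iter (nr.toNat % 4) _ _ _ p
    rw [hsh] at hsh2
    injection hsh2 with e1 rest; injection rest with e2 e3; injection e3 with e3 _
    subst e1; subst e2; subst e3
    rw [rotate_nA_eq, rotStepP_mod]
    simp only [selCoord] at happ2 ⊢
    norm_num at happ2 ⊢ <;>
    rw [← happ2] <;>
    norm_num
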